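-- pv_equiv track=rewrite | github.com/posl/comment_recommendation | script/split_gen/5_time/ja/232_C/3.py | check
-- ===== SOURCE A (Python) =====
-- def check(a, b, p):
--     for i in range(len(a)):
--         for j in range(len(a)):
--             if a[i] == a[j] and b[i] != b[j]:
--                 return False
--             if a[i] != a[j] and b[i] == b[j]:
--                 return False
--             if a[i] == a[j] and b[i] == b[j]:
--                 if p[i] != p[j]:
--                     return False
--     return True
-- ===== SOURCE B (Python) =====
-- def check(a, b, p):
--     a2b = {}
--     b2a = {}
--     a2p = {}
--     for ai, bi, pi in zip(a, b, p):
--         if a2b.setdefault(ai, bi) != bi: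
--             return False
--         if b2a.setdefault(bi, ai) != ai:
--             return False
--         if a2p.setdefault(ai, pi) != pi:
--             return False
--     return True
-- ===== Notes on version B (the rewrite author's own statement) =====
-- stated objective: faster
-- what changed: Replaced the quadratic all-pairs scan by a single pass that maintains three dicts (a->b, b->a, a->p) and checks each element against the value recorded at its first occurrence.
-- outside the precondition, e.g. on check([1, 2, 1], [3, 4, 5], [9]): A returns False, B returns True
import Mathlib
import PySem

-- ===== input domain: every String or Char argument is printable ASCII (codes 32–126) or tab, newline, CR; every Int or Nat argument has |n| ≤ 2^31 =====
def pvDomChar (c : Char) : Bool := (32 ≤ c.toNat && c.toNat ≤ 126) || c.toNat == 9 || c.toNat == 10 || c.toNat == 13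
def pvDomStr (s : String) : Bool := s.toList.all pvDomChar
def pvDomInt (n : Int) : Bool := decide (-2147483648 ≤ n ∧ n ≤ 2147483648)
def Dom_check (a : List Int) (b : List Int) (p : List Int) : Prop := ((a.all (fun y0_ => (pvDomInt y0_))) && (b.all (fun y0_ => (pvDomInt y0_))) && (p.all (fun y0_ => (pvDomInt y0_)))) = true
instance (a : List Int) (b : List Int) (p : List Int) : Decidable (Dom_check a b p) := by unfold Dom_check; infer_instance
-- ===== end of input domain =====

-- B replaces A's O(n^2) all-pairs scan by one O(n) pass with three dicts (a->b, b->a, a->p).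

-- ===== PORT A =====
-- nested for-loops over range(len(a)), early return False ported as Bool-valued all
def check (a : List Int) (b : List Int) (p : List Int) : Bool :=
  (List.range a.length).all fun i =>
    (List.range a.length).all fun j =>
      if a.getD i 0 = a.getD j 0 ∧ ¬ b.getD i 0 = b.getD j 0 then false
      else if ¬ a.getD i 0 = a.getD j 0 ∧ b.getD i 0 = b.getD j 0 then false
      else if a.getD i 0 = a.getD j 0 ∧ b.getD i 0 = b.getD j 0 then
        decide (p.getD i 0 = p.getD j 0)
      else true

-- ===== PORT B =====
-- zip(a, b, p): truncates to the shortest list, like Python's zip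
def pvZip3 : List Int → List Int → List Int → List (Int × Int × Int)
  | x :: xs, y :: ys, z :: zs => (x, y, z) :: pvZip3 xs ys zs
  | _, _, _ => []

-- the loop of Source B: d.setdefault(k, v) != v  is ported as  d.getD k v ≠ v  (check) then d.insert k v
-- (inserting the already-present equal value leaves the dict unchanged, exactly setdefault)
def pvAltLoop : List (Int × Int × Int) → PySem.Dict Int Int → PySem.Dict Int Int → PySem.Dict Int Int → Bool
  | [], _, _, _ => true
  | (x, y, z) :: r, ab, ba, ap =>
    if ¬ ab.getD x y = y then false
    else if ¬ ba.getD y x = x then false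
    else if ¬ ap.getD x z = z then false
    else pvAltLoop r (ab.insert x y) (ba.insert y x) (ap.insert x z)

def check_alt (a : List Int) (b : List Int) (p : List Int) : Bool :=
  pvAltLoop (pvZip3 a b p) PySem.Dict.empty PySem.Dict.empty PySem.Dict.empty

-- ===== PRECONDITION & SPEC =====
-- Pre_ excludes inputs where b or p is shorter than a: there Python A raises IndexError,
-- except when it finds an inconsistency before touching the missing index and still returns False
-- (an accident of scan order that B, which pairs elements positionally via zip, cannot observe).
def Pre_check (a : List Int) (b : List Int) (p : List Int) : Prop :=
  a.length ≤ b.length ∧ a.length ≤ p.length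
instance (a : List Int) (b : List Int) (p : List Int) : Decidable (Pre_check a b p) := by unfold Pre_check; infer_instance

def pvWitness_check : List Int × List Int × List Int := ([1, 2, 1], [5, 7, 5], [9, 4, 9])

def Spec_check (a : List Int) (b : List Int) (p : List Int) (out : Bool) : Prop := out = check_alt a b p
instance (a : List Int) (b : List Int) (p : List Int) (out : Bool) : Decidable (Spec_check a b p out) := by unfold Spec_check; infer_instance

-- ===== CLAIM (what is proved, stated in full; the proofs are below) =====
def Claim_equal_check : Prop := ∀ (a : List Int) (b : List Int) (p : List Int), Dom_check a b p → Pre_check a b p → Spec_check a b p (check a b p)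

-- ===== LEMMAS AND PROOFS =====

-- the consistency relation between two (a, b, p) triples
def pvR (t t' : Int × Int × Int) : Prop :=
  (t.1 = t'.1 ↔ t.2.1 = t'.2.1) ∧ (t.1 = t'.1 → t.2.2 = t'.2.2)

theorem pvR_refl (t : Int × Int × Int) : pvR t t := ⟨iff_of_true rfl rfl, fun _ => rfl⟩

theorem pvR_symm {t t' : Int × Int × Int} (h : pvR t t') : pvR t' t :=
  ⟨⟨fun h1 => (h.1.mp h1.symm).symm, fun h1 => (h.1.mpr h1.symm).symm⟩,
   fun h1 => (h.2 h1.symm).symm⟩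

theorem pvZip3_length {a b p : List Int} (hb : a.length ≤ b.length) (hp : a.length ≤ p.length) :
    (pvZip3 a b p).length = a.length := by
  induction a generalizing b p with
  | nil => cases b <;> cases p <;> simp [pvZip3]
  | cons x xs ih =>
    cases b with
    | nil => simp at hb
    | cons y ys =>
      cases p with
      | nil => simp at hp
      | cons z zs =>
        have hb' : xs.length ≤ ys.length := by simp at hb; omega
        have hp' : xs.length ≤ zs.length := by simp at hp; omega
        simp [pvZip3, ih hb' hp']

theorem pvZip3_getElem {a b p : List Int} (hb : a.length ≤ b.length) (hp : a.length ≤ p.length)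
    (i : ℕ) (hi : i < a.length) (h : i < (pvZip3 a b p).length) :
    (pvZip3 a b p)[i] = (a.getD i 0, b.getD i 0, p.getD i 0) := by
  induction a generalizing b p i with
  | nil => simp at hi
  | cons x xs ih =>
    cases b with
    | nil => simp at hb
    | cons y ys =>
      cases p with
      | nil => simp at hp
      | cons z zs =>
        cases i with
        | zero => simp [pvZip3]
        | succ n =>
          simp only [pvZip3, List.getElem_cons_succ, List.getD_cons_succ]
          exact ih (by simpa using hb) (by simpa using hp) n (by simpa using hi)
            (by simpa [pvZip3] using h)

def pvDCond (ab ba ap : PySem.Dict Int Int) (t : Int × Int × Int) : Prop :=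
  ab.getD t.1 t.2.1 = t.2.1 ∧ ba.getD t.2.1 t.1 = t.1 ∧ ap.getD t.1 t.2.2 = t.2.2

-- key step lemma: after a consistent head is inserted, the dict condition for a later triple
-- is exactly "consistent with the head, and the old dict condition"
theorem pvDCond_insert {ab ba ap : PySem.Dict Int Int} {x y z : Int}
    (hx : ab.getD x y = y) (hy : ba.getD y x = x) (hz : ap.getD x z = z)
    (t : Int × Int × Int) :
    pvDCond (ab.insert x y) (ba.insert y x) (ap.insert x z) t ↔
      (pvR (x, y, z) t ∧ pvDCond ab ba ap t) := by
  obtain ⟨x', y', z'⟩ := t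
  simp only [pvDCond, pvR, PySem.Dict.getD_insert]
  by_cases hxx : x' = x <;> by_cases hyy : y' = y <;> by_cases hzz : z' = z <;>
    subst_vars <;> simp_all <;> tauto

theorem pvAltLoop_iff (l : List (Int × Int × Int)) (ab ba ap : PySem.Dict Int Int) :
    pvAltLoop l ab ba ap = true ↔ (l.Pairwise pvR ∧ ∀ t ∈ l, pvDCond ab ba ap t) := by
  induction l generalizing ab ba ap with
  | nil => simp [pvAltLoop]
  | cons h r ih =>
    obtain ⟨x, y, z⟩ := h
    by_cases hx : ab.getD x y = y
    · by_cases hy : ba.getD y x = x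
      · by_cases hz : ap.getD x z = z
        · rw [show pvAltLoop ((x,y,z) :: r) ab ba ap
              = pvAltLoop r (ab.insert x y) (ba.insert y x) (ap.insert x z) by
            simp [pvAltLoop, hx, hy, hz]]
          rw [ih]
          constructor
          · rintro ⟨hpw, hall⟩
            refine ⟨List.Pairwise.cons (fun t ht => ((pvDCond_insert hx hy hz t).mp (hall t ht)).1) hpw,
              ?_⟩
            rintro t ht
            rcases List.mem_cons.mp ht with rfl | ht
            · exact ⟨hx, hy, hz⟩
            · exact ((pvDCond_insert hx hy hz t).mp (hall t ht)).2
          · rintro ⟨hpw, hall⟩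
            rcases List.pairwise_cons.mp hpw with ⟨hhead, hr⟩
            exact ⟨hr, fun t ht => (pvDCond_insert hx hy hz t).mpr
              ⟨hhead t ht, hall t (List.mem_cons_of_mem _ ht)⟩⟩
        · rw [show pvAltLoop ((x, y, z) :: r) ab ba ap = false by simp [pvAltLoop, hx, hy, hz]]
          simp only [Bool.false_eq_true, false_iff, not_and]
          intro _ hall
          exact hz (hall (x, y, z) (by simp)).2.2
      · rw [show pvAltLoop ((x, y, z) :: r) ab ba ap = false by simp [pvAltLoop, hx, hy]]
        simp only [Bool.false_eq_true, false_iff, not_and]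
        intro _ hall
        exact hy (hall (x, y, z) (by simp)).2.1
    · rw [show pvAltLoop ((x, y, z) :: r) ab ba ap = false by simp [pvAltLoop, hx]]
      simp only [Bool.false_eq_true, false_iff, not_and]
      intro _ hall
      exact hx (hall (x, y, z) (by simp)).1

theorem check_alt_iff {a b p : List Int} :
    check_alt a b p = true ↔ (pvZip3 a b p).Pairwise pvR := by
  rw [check_alt, pvAltLoop_iff]
  simp [pvDCond, PySem.Dict.getD_empty]

theorem pvInner_iff (ai aj bi bj pi pj : Int) :
    ((if ai = aj ∧ ¬ bi = bj then false
      else if ¬ ai = aj ∧ bi = bj then false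
      else if ai = aj ∧ bi = bj then decide (pi = pj)
      else true) = true) ↔ pvR (ai, bi, pi) (aj, bj, pj) := by
  simp only [pvR]
  split_ifs with h1 h2 h3 <;> simp <;> tauto

theorem check_iff {a b p : List Int} :
    check a b p = true ↔
      ∀ i j, i < a.length → j < a.length →
        pvR (a.getD i 0, b.getD i 0, p.getD i 0) (a.getD j 0, b.getD j 0, p.getD j 0) := by
  simp only [check, List.all_eq_true, List.mem_range, pvInner_iff]
  tauto

-- ===== VERDICT (by name: the statement is the Claim_ definition above) =====
theorem check_spec : Claim_equal_check := by
  intro a b p _ hpre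
  unfold Spec_check
  rcases hpre with ⟨hb, hp⟩
  have hlen := pvZip3_length hb hp
  have hiff : check a b p = true ↔ check_alt a b p = true := by
    rw [check_iff, check_alt_iff, List.pairwise_iff_getElem]
    constructor
    · intro h i j hi hj hij
      rw [pvZip3_getElem hb hp i (by omega) hi, pvZip3_getElem hb hp j (by omega) hj]
      exact h i j (by omega) (by omega)
    · intro h i j hi hj
      rcases lt_trichotomy i j with hij | rfl | hij
      · have := h i j (by omega) (by omega) hij
        rwa [pvZip3_getElem hb hp i (by omega) (by omega),
             pvZip3_getElem hb hp j (by omega) (by omega)] at this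
      · exact pvR_refl _
      · have := h j i (by omega) (by omega) hij
        rw [pvZip3_getElem hb hp j (by omega) (by omega),
            pvZip3_getElem hb hp i (by omega) (by omega)] at this
        exact pvR_symm this
  cases hA : check a b p <;> cases hB : check_alt a b p <;> simp_all
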